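-- pv_equiv track=rewrite | github.com/Milamagof/algoritmo-detectar-inicio-sesion-sospechoso | Algoritmo detectar inicio sesion sospechoso.py | login_check
-- ===== SOURCE A (Python) =====
-- def login_check(login_list, usuario_actual):
--     if usuario_actual in login_list:
--         counter = 0
--         for i in login_list:
--             if i == usuario_actual:
--                 counter = counter + 1
--
--         if counter >= 3:
--             return "Haz hecho 3 o más intentos de inicio de sesión.Tu cuenta ha sido bloqueada"
--         else:
--             return "Estás logueado"
--     else:
--         return "Usuario inexistente"
-- ===== SOURCE B (Python) =====
-- def login_check(login_list, usuario_actual):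
--     seen = 0
--     for i in login_list:
--         if i == usuario_actual:
--             seen = seen + 1
--             if seen == 3:
--                 # third occurrence found: stop scanning immediately
--                 return "Haz hecho 3 o más intentos de inicio de sesión.Tu cuenta ha sido bloqueada"
--     if seen == 0:
--         return "Usuario inexistente"
--     return "Estás logueado"
-- ===== Notes on version B (the rewrite author's own statement) =====
-- stated objective: alternative
-- what changed: Replaced A's two full scans (membership test then exhaustive count) by a single early-exit scan that returns the blocked message as soon as the third occurrence is seen and otherwise decides on 0-vs-some at the end.
import Mathlib
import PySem

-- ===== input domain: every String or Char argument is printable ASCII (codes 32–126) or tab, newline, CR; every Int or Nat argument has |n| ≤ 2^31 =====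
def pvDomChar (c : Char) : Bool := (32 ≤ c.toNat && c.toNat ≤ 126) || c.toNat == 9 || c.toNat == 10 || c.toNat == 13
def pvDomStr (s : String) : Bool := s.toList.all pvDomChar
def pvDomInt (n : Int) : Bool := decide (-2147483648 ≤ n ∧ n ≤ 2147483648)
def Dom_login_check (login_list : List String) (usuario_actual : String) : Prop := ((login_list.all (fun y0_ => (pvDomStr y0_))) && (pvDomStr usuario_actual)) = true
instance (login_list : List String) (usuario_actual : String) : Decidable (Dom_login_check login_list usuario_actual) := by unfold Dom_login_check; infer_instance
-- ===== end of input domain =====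

-- B replaces A's two full scans (membership test, then exhaustive count) by one early-exit scan
-- that returns the blocked message at the third match and decides 0-vs-some at the end (alternative control flow).

-- ===== PORT A =====
def login_check (login_list : List String) (usuario_actual : String) : String :=
  if login_list.contains usuario_actual then
    let counter : Int :=
      login_list.foldl (fun c i => if i == usuario_actual then c + 1 else c) 0
    if counter ≥ 3 then
      "Haz hecho 3 o más intentos de inicio de sesión.Tu cuenta ha sido bloqueada"
    else
      "Estás logueado"
  else
    "Usuario inexistente"

-- ===== PORT B =====
-- the early-exit loop of Source B, as structural recursion threading `seen`
def login_check_go (usuario_actual : String) : List String → Int → String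
  | [], seen =>
      if seen == 0 then "Usuario inexistente" else "Estás logueado"
  | i :: rest, seen =>
      if i == usuario_actual then
        if seen + 1 == 3 then
          "Haz hecho 3 o más intentos de inicio de sesión.Tu cuenta ha sido bloqueada"
        else
          login_check_go usuario_actual rest (seen + 1)
      else
        login_check_go usuario_actual rest seen

def login_check_alt (login_list : List String) (usuario_actual : String) : String :=
  login_check_go usuario_actual login_list 0

-- ===== PRECONDITION & SPEC =====
def Spec_login_check (login_list : List String) (usuario_actual : String) (out : String) : Prop := out = login_check_alt login_list usuario_actual
instance (login_list : List String) (usuario_actual : String) (out : String) : Decidable (Spec_login_check login_list usuario_actual out) := by unfold Spec_login_check; infer_instance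

-- ===== CLAIM =====
def Claim_equal_login_check : Prop := ∀ (login_list : List String) (usuario_actual : String), Dom_login_check login_list usuario_actual → Spec_login_check login_list usuario_actual (login_check login_list usuario_actual)

-- ===== LEMMAS AND PROOFS =====

-- A's counting fold equals the initial value plus the list count.
theorem login_check_foldl_count (login_list : List String) (u : String) (c : Int) :
    login_list.foldl (fun c i => if i == u then c + 1 else c) c
      = c + (login_list.count u : Int) := by
  induction login_list generalizing c with
  | nil => simp
  | cons x xs ih =>
    by_cases h : x = u
    · subst h
      rw [List.foldl_cons, if_pos (by simp), ih, List.count_cons_self]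
      push_cast; ring
    · rw [List.foldl_cons, if_neg (by simp [h]), ih]
      simp [List.count_cons]
      exact h

-- Characterisation of B's early-exit loop for a saturation state seen < 3.
theorem login_check_go_eq (u : String) (L : List String) (seen : Int)
    (h0 : 0 ≤ seen) (h3 : seen < 3) :
    login_check_go u L seen =
      if seen + (L.count u : Int) ≥ 3 then
        "Haz hecho 3 o más intentos de inicio de sesión.Tu cuenta ha sido bloqueada"
      else if seen + (L.count u : Int) == 0 then "Usuario inexistente"
      else "Estás logueado" := by
  induction L generalizing seen with
  | nil =>
    simp only [login_check_go, List.count_nil]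
    have : ¬ (seen + ((0:Nat):Int) ≥ 3) := by omega
    rw [if_neg this]
    by_cases hz : seen = 0
    · simp [hz]
    · simp [hz]
  | cons x xs ih =>
    by_cases h : x = u
    · subst h
      rw [login_check_go, if_pos (by simp), List.count_cons_self]
      by_cases hs : seen + 1 = 3
      · have hb : ((seen + 1) == (3:Int)) = true := by simpa using hs
        rw [if_pos hb]
        have : seen + ((xs.count x + 1 : Nat) : Int) ≥ 3 := by push_cast; omega
        rw [if_pos this]
      · have hb : ((seen + 1) == (3:Int)) = false := by simpa using hs
        rw [if_neg (by simp [hb]), ih (seen + 1) (by omega) (by omega)]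
        have he : seen + 1 + (xs.count x : Int) = seen + ((xs.count x + 1 : Nat) : Int) := by
          push_cast; ring
        rw [he]
    · rw [login_check_go, if_neg (by simp [h]), ih seen h0 h3]
      have : (x :: xs).count u = xs.count u := by simp [h]
      rw [this]

-- Membership holds iff the count is nonzero.
theorem login_check_contains_iff (login_list : List String) (u : String) :
    login_list.contains u = true ↔ ¬ ((login_list.count u : Int) = 0) := by
  rw [List.contains_iff_mem]
  constructor
  · intro hmem hz
    have : 0 < login_list.count u := List.count_pos_iff.mpr hmem
    omega
  · intro h
    have : 0 < login_list.count u := Nat.pos_of_ne_zero (fun e => h (by simp [e]))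
    exact List.count_pos_iff.mp this

-- ===== VERDICT =====
theorem login_check_spec : Claim_equal_login_check := by
  intro L u _
  unfold Spec_login_check login_check login_check_alt
  rw [login_check_go_eq u L 0 (by omega) (by omega)]
  simp only [login_check_foldl_count, zero_add]
  by_cases h : L.contains u = true
  · have hz := (login_check_contains_iff L u).mp h
    rw [if_pos h]
    by_cases h3 : (L.count u : Int) ≥ 3
    · rw [if_pos h3, if_pos h3]
    · rw [if_neg h3, if_neg h3]
      have hb : (((L.count u : Int)) == 0) = false := by simpa using hz
      rw [if_neg (by simp [hb])]
  · have hz : (L.count u : Int) = 0 := by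
      by_contra hc
      exact h ((login_check_contains_iff L u).mpr hc)
    rw [if_neg h]
    have : ¬ ((L.count u : Int) ≥ 3) := by omega
    rw [if_neg this]
    have hb : (((L.count u : Int)) == 0) = true := by simpa using hz
    rw [if_pos hb]
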